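-- pv_equiv track=rewrite | github.com/chatterbox/Object-LSTM | create_symmetry_pseudo_img.py | calcu_symmetric_lane_num
-- ===== SOURCE A (Python) =====
-- def calcu_symmetric_lane_num(input_num):
--
--     column_num = input_num // 16
--     input_num = input_num % 16
--     if input_num == 0 and column_num >= 1:
--         column_num = column_num - 1
--         input_num = 16
--     first_list = []
--     second_list = []
--     for i in range(8, 0, -1):
--         first_list.append(i)
--     for i in range(9, 17):
--         second_list.append(i)
--
--     if input_num in first_list:
--         correspond_index = first_list.index(input_num)
--         correspond_num = second_list[correspond_index]
--     else:
--         correspond_index = second_list.index(input_num)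
--         correspond_num = first_list[correspond_index]
--     correspond_num = correspond_num + column_num * 16
--     return correspond_num
-- ===== SOURCE B (Python) =====
-- def calcu_symmetric_lane_num(input_num):
--     column, rem = divmod(input_num, 16)
--     if rem == 0 and column >= 1:
--         column -= 1
--         rem = 16
--     return 17 - rem + column * 16
-- ===== Notes on version B (the rewrite author's own statement) =====
-- stated objective: simpler
-- what changed: Replaces the two built lists and the index/lookup mirroring with the closed form 17 - rem + column*16 after the same divmod normalization.
import Mathlib
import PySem

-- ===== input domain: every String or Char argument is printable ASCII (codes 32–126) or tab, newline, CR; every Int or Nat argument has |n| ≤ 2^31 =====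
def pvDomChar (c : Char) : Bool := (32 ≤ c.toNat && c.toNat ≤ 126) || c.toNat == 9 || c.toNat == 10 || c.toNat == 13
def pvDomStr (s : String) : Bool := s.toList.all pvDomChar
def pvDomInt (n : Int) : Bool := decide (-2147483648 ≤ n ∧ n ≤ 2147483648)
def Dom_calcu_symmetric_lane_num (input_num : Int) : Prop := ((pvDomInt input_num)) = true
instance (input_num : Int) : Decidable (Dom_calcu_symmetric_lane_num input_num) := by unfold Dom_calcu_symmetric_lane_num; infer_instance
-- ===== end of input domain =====

-- B replaces A's list building and index mirroring by the closed form 17 - rem + column*16 (simpler).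

-- ===== PORT A =====
def calcu_symmetric_lane_num (input_num : Int) : Int :=
  let column_num := PySem.Int.floordiv input_num 16
  let input_num := PySem.Int.mod input_num 16
  let p : Int × Int :=
    if input_num = 0 ∧ column_num ≥ 1 then (column_num - 1, 16) else (column_num, input_num)
  let column_num := p.1
  let input_num := p.2
  let first_list := (PySem.List.pyRange 8 0 (-1)).foldl (fun acc i => acc ++ [i]) []
  let second_list := (PySem.List.pyRange 9 17 1).foldl (fun acc i => acc ++ [i]) []
  let correspond_num : Int :=
    if first_list.contains input_num then
      match PySem.List.index? first_list input_num with
      | some idx => (PySem.List.pyGet? second_list (Int.ofNat idx)).getD 0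
      | none => 0   -- unreachable: contains holds
    else
      match PySem.List.index? second_list input_num with
      | some idx => (PySem.List.pyGet? first_list (Int.ofNat idx)).getD 0
      | none => 0   -- Python raises ValueError here; excluded by Pre_
  correspond_num + column_num * 16

-- ===== PORT B =====
def calcu_symmetric_lane_num_alt (input_num : Int) : Int :=
  let column := PySem.Int.floordiv input_num 16
  let rem := PySem.Int.mod input_num 16
  let p : Int × Int :=
    if rem = 0 ∧ column ≥ 1 then (column - 1, 16) else (column, rem)
  17 - p.2 + p.1 * 16

-- ===== PRECONDITION & SPEC =====
-- Pre_ excludes exactly the inputs where A raises ValueError: non-positive multiples of 16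
-- (the adjusted remainder stays 0, which is in neither list).
def Pre_calcu_symmetric_lane_num (input_num : Int) : Prop :=
  ¬ (PySem.Int.mod input_num 16 = 0 ∧ input_num ≤ 0)
instance (input_num : Int) : Decidable (Pre_calcu_symmetric_lane_num input_num) := by
  unfold Pre_calcu_symmetric_lane_num; infer_instance

def pvWitness_calcu_symmetric_lane_num : Int := 7

def Spec_calcu_symmetric_lane_num (input_num : Int) (out : Int) : Prop := out = calcu_symmetric_lane_num_alt input_num
instance (input_num : Int) (out : Int) : Decidable (Spec_calcu_symmetric_lane_num input_num out) := by unfold Spec_calcu_symmetric_lane_num; infer_instance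

-- ===== CLAIM (what is proved, stated in full; the proofs are below) =====
def Claim_equal_calcu_symmetric_lane_num : Prop := ∀ (input_num : Int), Dom_calcu_symmetric_lane_num input_num → Pre_calcu_symmetric_lane_num input_num → Spec_calcu_symmetric_lane_num input_num (calcu_symmetric_lane_num input_num)

-- ===== LEMMAS AND PROOFS =====

-- A's list machinery applied to an already-adjusted (column, remainder) pair
def pvCoreA (c r : Int) : Int :=
  let first_list := (PySem.List.pyRange 8 0 (-1)).foldl (fun acc i => acc ++ [i]) []
  let second_list := (PySem.List.pyRange 9 17 1).foldl (fun acc i => acc ++ [i]) []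
  let correspond_num : Int :=
    if first_list.contains r then
      match PySem.List.index? first_list r with
      | some idx => (PySem.List.pyGet? second_list (Int.ofNat idx)).getD 0
      | none => 0
    else
      match PySem.List.index? second_list r with
      | some idx => (PySem.List.pyGet? first_list (Int.ofNat idx)).getD 0
      | none => 0
  correspond_num + c * 16

lemma pvA_eq (n : Int) :
    calcu_symmetric_lane_num n =
      (if PySem.Int.mod n 16 = 0 ∧ PySem.Int.floordiv n 16 ≥ 1
       then pvCoreA (PySem.Int.floordiv n 16 - 1) 16
       else pvCoreA (PySem.Int.floordiv n 16) (PySem.Int.mod n 16)) := by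
  simp only [calcu_symmetric_lane_num, pvCoreA]
  split_ifs <;> rfl

lemma pvB_eq (n : Int) :
    calcu_symmetric_lane_num_alt n =
      (if PySem.Int.mod n 16 = 0 ∧ PySem.Int.floordiv n 16 ≥ 1
       then 17 - 16 + (PySem.Int.floordiv n 16 - 1) * 16
       else 17 - PySem.Int.mod n 16 + PySem.Int.floordiv n 16 * 16) := by
  simp only [calcu_symmetric_lane_num_alt]
  split_ifs <;> ring

lemma pvCore_eq (c r : Int) (h1 : 1 ≤ r) (h2 : r ≤ 16) :
    pvCoreA c r = 17 - r + c * 16 := by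
  interval_cases r <;>
    (norm_num [pvCoreA, PySem.List.pyRange, PySem.List.index?, PySem.List.pyGet?,
       PySem.List.pyIdx?]) <;> decide

-- ===== VERDICT (by name: the statement is the Claim_ definition above) =====
theorem calcu_symmetric_lane_num_spec : Claim_equal_calcu_symmetric_lane_num := by
  intro n _ hpre
  unfold Spec_calcu_symmetric_lane_num
  rw [pvA_eq, pvB_eq]
  have hd : PySem.Int.floordiv n 16 = n / 16 := PySem.Int.floordiv_eq_ediv_of_pos (by norm_num)
  have hm : PySem.Int.mod n 16 = n % 16 := by
    simp [PySem.Int.mod, Int.fmod_eq_emod]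
  unfold Pre_calcu_symmetric_lane_num at hpre
  by_cases h : PySem.Int.mod n 16 = 0 ∧ PySem.Int.floordiv n 16 ≥ 1
  · rw [if_pos h, if_pos h, pvCore_eq _ _ (by norm_num) (by norm_num)]
  · rw [if_neg h, if_neg h]
    have hr0 : PySem.Int.mod n 16 ≠ 0 := by
      intro h0
      rw [hm] at h0 hpre
      rw [hd] at h
      omega
    refine pvCore_eq _ _ ?_ ?_ <;> rw [hm] at hr0 ⊢ <;>
      have := Int.emod_nonneg n (show (16:Int) ≠ 0 by norm_num) <;>
      have := Int.emod_lt_of_pos n (show (0:Int) < 16 by norm_num) <;> omega
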